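-- pv_equiv track=rewrite | github.com/tmelanson17/wiki_gator | wiki_analyzer/extractors/wikipedia.py | _is_wiki_article_link
-- ===== SOURCE A (Python) =====
-- def _is_wiki_article_link(href: str) -> bool:
--     """Check if a link points to a Wikipedia article."""
--     # Must start with /wiki/
--     if not href.startswith("/wiki/"):
--         return False
--
--     # Exclude special pages, files, categories, etc.
--     excluded_prefixes = [
--         "/wiki/File:",
--         "/wiki/Category:",
--         "/wiki/Template:",
--         "/wiki/Wikipedia:",
--         "/wiki/Help:",
--         "/wiki/Portal:",
--         "/wiki/Special:",
--         "/wiki/Talk:",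
--         "/wiki/User:",
--         "/wiki/Module:",
--         "/wiki/MediaWiki:",
--     ]
--
--     for prefix in excluded_prefixes:
--         if href.startswith(prefix):
--             return False
--
--     # Exclude fragment-only links and query strings
--     if "#" in href.split("/")[-1] and href.index("#") < len(href) - 1:
--         # Has a fragment, but might still be a valid article link
--         pass
--
--     return True
-- ===== SOURCE B (Python) =====
-- _WIKI_NAMESPACES = {
--     "File", "Category", "Template", "Wikipedia", "Help", "Portal",
--     "Special", "Talk", "User", "Module", "MediaWiki",
-- }
--
--
-- def _is_wiki_article_link(href: str) -> bool:
--     """Check if a link points to a Wikipedia article."""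
--     if href[:6] != "/wiki/":
--         return False
--     # Single left-to-right scan of the title: accumulate the would-be
--     # namespace name; at the FIRST colon decide by set membership.
--     name = []
--     for ch in href[6:]:
--         if ch == ":":
--             return "".join(name) not in _WIKI_NAMESPACES
--         name.append(ch)
--     return True
-- ===== Notes on version B (the rewrite author's own statement) =====
-- stated objective: alternative
-- what changed: Instead of testing eleven hard-coded namespace prefixes, B scans the title once character by character, accumulating the text before the first colon and deciding by membership in a set of the eleven namespace names; A's no-op fragment block is dropped.
import Mathlib
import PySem

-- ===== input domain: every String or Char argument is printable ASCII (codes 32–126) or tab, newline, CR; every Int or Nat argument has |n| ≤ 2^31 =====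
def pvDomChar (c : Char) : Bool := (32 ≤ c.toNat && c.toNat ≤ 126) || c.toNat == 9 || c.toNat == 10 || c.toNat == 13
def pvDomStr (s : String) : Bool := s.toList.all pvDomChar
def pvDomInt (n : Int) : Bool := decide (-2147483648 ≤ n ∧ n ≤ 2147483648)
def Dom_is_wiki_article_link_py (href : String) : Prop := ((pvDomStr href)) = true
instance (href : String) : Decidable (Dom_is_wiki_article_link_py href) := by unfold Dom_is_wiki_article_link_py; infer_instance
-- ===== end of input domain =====

-- B replaces A's scan over eleven hard-coded namespace prefixes by one
-- character-by-character scan of the title that accumulates the text before the first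
-- colon and decides by set membership (alternative decomposition; A's final fragment
-- branch has an empty body and is dropped as a no-op).


-- ===== PORT A =====
def excludedPrefixes : List String := [
  "/wiki/File:",
  "/wiki/Category:",
  "/wiki/Template:",
  "/wiki/Wikipedia:",
  "/wiki/Help:",
  "/wiki/Portal:",
  "/wiki/Special:",
  "/wiki/Talk:",
  "/wiki/User:",
  "/wiki/Module:",
  "/wiki/MediaWiki:"]

def is_wiki_article_link_py (href : String) : Bool :=
  if !(PySem.Str.startswith href "/wiki/") then false
  -- 'for prefix in excluded_prefixes: if href.startswith(prefix): return False' = any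
  else if excludedPrefixes.any (fun p => PySem.Str.startswith href p) then false
  -- A's final fragment branch has an empty body: no observable effect, omitted
  else true

-- ===== PORT B =====
def wikiNamespaces : PySem.Set String :=
  PySem.Set.ofList ["File", "Category", "Template", "Wikipedia", "Help", "Portal",
                    "Special", "Talk", "User", "Module", "MediaWiki"]

-- the 'for ch in href[6:]' loop of Source B: accumulator 'name', early return at the first ':'
def scanTitle (name : List Char) : List Char → Bool
  | [] => true
  | ch :: cs =>
      if ch = ':' then !(PySem.Set.contains wikiNamespaces (String.ofList name))
      else scanTitle (name ++ [ch]) cs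

def is_wiki_article_link_py_alt (href : String) : Bool :=
  if PySem.Str.slice href none (some 6) ≠ "/wiki/" then false   -- href[:6] != "/wiki/"
  else scanTitle [] (PySem.Str.slice href (some 6) none).toList -- loop over href[6:]

-- ===== PRECONDITION & SPEC =====
def Spec_is_wiki_article_link_py (href : String) (out : Bool) : Prop := out = is_wiki_article_link_py_alt href
instance (href : String) (out : Bool) : Decidable (Spec_is_wiki_article_link_py href out) := by unfold Spec_is_wiki_article_link_py; infer_instance

-- ===== CLAIM (what is proved, stated in full; the proofs are below) =====
def Claim_equal_is_wiki_article_link_py : Prop := ∀ (href : String), Dom_is_wiki_article_link_py href → Spec_is_wiki_article_link_py href (is_wiki_article_link_py href)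

-- ===== LEMMAS AND PROOFS =====

theorem takeWhile_colon (N t : List Char) (h : ':' ∉ N) :
    (N ++ ':' :: t).takeWhile (fun c => c ≠ ':') = N := by
  induction N with
  | nil => simp
  | cons a l ih =>
    simp only [List.mem_cons, not_or] at h
    have ha : ¬ a = ':' := fun e => h.1 e.symm
    rw [List.cons_append, List.takeWhile_cons]
    simp only [decide_not] at ih ⊢
    simp [ha, ih h.2]

theorem dropWhile_head_false {α : Type} (p : α → Bool) (r : List α) (b : α) (t : List α)
    (h : r.dropWhile p = b :: t) : p b = false := by
  induction r with
  | nil => simp [List.dropWhile] at h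
  | cons a l ih =>
    rw [List.dropWhile_cons] at h
    by_cases ha : p a = true
    · rw [if_pos ha] at h; exact ih h
    · rw [if_neg ha] at h
      cases h
      simpa using ha

-- "r starts with N:" iff "r has a colon and the part before the first colon is N"
theorem prefix_colon_iff (N r : List Char) (h : ':' ∉ N) :
    (N ++ [':']) <+: r ↔ (':' ∈ r ∧ r.takeWhile (fun c => c ≠ ':') = N) := by
  constructor
  · rintro ⟨t, rfl⟩
    refine ⟨by simp, ?_⟩
    rw [List.append_assoc, List.singleton_append]
    exact takeWhile_colon N t h
  · rintro ⟨hmem, htw⟩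
    have hsplit : r.takeWhile (fun c => c ≠ ':') ++ r.dropWhile (fun c => c ≠ ':') = r :=
      List.takeWhile_append_dropWhile
    have hne : r.dropWhile (fun c => c ≠ ':') ≠ [] := by
      intro hnil
      rw [hnil, List.append_nil] at hsplit
      have := List.mem_takeWhile_imp (l := r) (p := fun c => decide (c ≠ ':'))
        (by rw [hsplit]; exact hmem)
      simp at this
    obtain ⟨b, t, hbt⟩ := List.exists_cons_of_ne_nil hne
    have hb : b = ':' := by
      have := dropWhile_head_false (fun c => decide (c ≠ ':')) r b t hbt
      simpa using this
    refine ⟨t, ?_⟩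
    rw [← hsplit, htw, hbt, hb]
    simp

-- one prefix test of A, given href = "/wiki/" ++ r
theorem startswith_wiki_ns (href : String) (r : List Char) (hr : href.toList = "/wiki/".toList ++ r)
    (N : String) (hN : ':' ∉ N.toList) (pre : String) (hpre : pre.toList = "/wiki/".toList ++ (N.toList ++ [':'])) :
    PySem.Str.startswith href pre =
      (decide (':' ∈ r) && decide (r.takeWhile (fun c => c ≠ ':') = N.toList)) := by
  refine Bool.eq_iff_iff.mpr ?_
  rw [PySem.Str.startswith_eq, hr, hpre, PySem.Chars.startswith_iff,
      List.prefix_append_right_inj, prefix_colon_iff N.toList r hN]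
  simp

theorem rest_toList (href : String) (r : List Char) (hr : href.toList = "/wiki/".toList ++ r) :
    (PySem.Str.slice href (some 6) none).toList = r := by
  rw [PySem.Str.toList_slice, PySem.Chars.slice_eq_listSlice,
      show (6 : Int) = ((6 : Nat) : Int) from rfl, PySem.List.slice_from_natCast, hr]
  exact List.drop_left' (by rfl)

-- B's guard 'href[:6] != "/wiki/"' fails exactly when "/wiki/" is a prefix of href
theorem guard_iff (href : String) :
    PySem.Str.slice href none (some 6) = "/wiki/" ↔ "/wiki/".toList <+: href.toList := by
  constructor
  · intro h
    have : (PySem.Str.slice href none (some 6)).toList = "/wiki/".toList := by rw [h]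
    rw [PySem.Str.toList_slice, PySem.Chars.slice_eq_listSlice,
        show (6 : Int) = ((6 : Nat) : Int) from rfl, PySem.List.slice_to_natCast] at this
    exact this ▸ List.take_prefix 6 href.toList
  · rintro ⟨t, ht⟩
    apply String.ext
    rw [PySem.Str.toList_slice, PySem.Chars.slice_eq_listSlice,
        show (6 : Int) = ((6 : Nat) : Int) from rfl, PySem.List.slice_to_natCast, ← ht]
    exact List.take_left' (by rfl)

-- A's startswith guard, in terms of the same prefix fact
theorem startswith_iff_prefix (href : String) :
    PySem.Str.startswith href "/wiki/" = true ↔ "/wiki/".toList <+: href.toList := by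
  rw [PySem.Str.startswith_eq, PySem.Chars.startswith_iff]

-- characterization of Source B's loop
theorem scanTitle_eq (r acc : List Char) :
    scanTitle acc r =
      if ':' ∈ r then
        !(PySem.Set.contains wikiNamespaces (String.ofList (acc ++ r.takeWhile (fun c => c ≠ ':'))))
      else true := by
  induction r generalizing acc with
  | nil => simp [scanTitle]
  | cons ch cs ih =>
    by_cases hc : ch = ':'
    · subst hc
      simp [scanTitle]
    · have hc' : ¬ (':' = ch) := fun e => hc e.symm
      rw [scanTitle, if_neg hc, ih (acc ++ [ch]), List.takeWhile_cons]
      simp [hc, hc']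

theorem ofList_eq_iff (l : List Char) (s : String) : (String.ofList l = s) ↔ l = s.toList := by
  constructor
  · intro h; rw [← h, String.toList_ofList]
  · intro h; rw [h]; exact String.ofList_toList

-- A's exclusion scan agrees with B's loop, given href = "/wiki/" ++ r
theorem cond_eq (href : String) (r : List Char) (hr : href.toList = "/wiki/".toList ++ r) :
    (!(excludedPrefixes.any fun p => PySem.Str.startswith href p)) = scanTitle [] r := by
  rw [scanTitle_eq r []]
  have e1 := startswith_wiki_ns href r hr "File" (by simp) "/wiki/File:" (by rfl)
  have e2 := startswith_wiki_ns href r hr "Category" (by simp) "/wiki/Category:" (by rfl)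
  have e3 := startswith_wiki_ns href r hr "Template" (by simp) "/wiki/Template:" (by rfl)
  have e4 := startswith_wiki_ns href r hr "Wikipedia" (by simp) "/wiki/Wikipedia:" (by rfl)
  have e5 := startswith_wiki_ns href r hr "Help" (by simp) "/wiki/Help:" (by rfl)
  have e6 := startswith_wiki_ns href r hr "Portal" (by simp) "/wiki/Portal:" (by rfl)
  have e7 := startswith_wiki_ns href r hr "Special" (by simp) "/wiki/Special:" (by rfl)
  have e8 := startswith_wiki_ns href r hr "Talk" (by simp) "/wiki/Talk:" (by rfl)
  have e9 := startswith_wiki_ns href r hr "User" (by simp) "/wiki/User:" (by rfl)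
  have e10 := startswith_wiki_ns href r hr "Module" (by simp) "/wiki/Module:" (by rfl)
  have e11 := startswith_wiki_ns href r hr "MediaWiki" (by simp) "/wiki/MediaWiki:" (by rfl)
  have hmem : ∀ (nm : String),
      (PySem.Set.contains wikiNamespaces nm = true ↔
        nm ∈ ["File", "Category", "Template", "Wikipedia", "Help", "Portal",
              "Special", "Talk", "User", "Module", "MediaWiki"]) := by
    intro nm
    rw [show PySem.Set.contains wikiNamespaces nm = List.contains wikiNamespaces nm from rfl,
        List.contains_iff_mem, wikiNamespaces]
    exact PySem.Set.mem_ofList _ _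
  have hcontain : PySem.Set.contains wikiNamespaces
      (String.ofList ([] ++ r.takeWhile (fun c => c ≠ ':'))) =
      (decide (r.takeWhile (fun c => c ≠ ':') = "File".toList) ||
       decide (r.takeWhile (fun c => c ≠ ':') = "Category".toList) ||
       decide (r.takeWhile (fun c => c ≠ ':') = "Template".toList) ||
       decide (r.takeWhile (fun c => c ≠ ':') = "Wikipedia".toList) ||
       decide (r.takeWhile (fun c => c ≠ ':') = "Help".toList) ||
       decide (r.takeWhile (fun c => c ≠ ':') = "Portal".toList) ||
       decide (r.takeWhile (fun c => c ≠ ':') = "Special".toList) ||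
       decide (r.takeWhile (fun c => c ≠ ':') = "Talk".toList) ||
       decide (r.takeWhile (fun c => c ≠ ':') = "User".toList) ||
       decide (r.takeWhile (fun c => c ≠ ':') = "Module".toList) ||
       decide (r.takeWhile (fun c => c ≠ ':') = "MediaWiki".toList)) := by
    rw [List.nil_append]
    refine Bool.eq_iff_iff.mpr ?_
    rw [hmem]
    simp only [List.mem_cons, List.not_mem_nil, or_false, ofList_eq_iff,
      Bool.or_eq_true, decide_eq_true_eq]
    generalize List.takeWhile (fun c => decide (c ≠ ':')) r = t
    simp only [or_assoc]
  by_cases hc : ':' ∈ r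
  · rw [if_pos hc, hcontain]
    simp only [excludedPrefixes, List.any_cons, List.any_nil,
      e1, e2, e3, e4, e5, e6, e7, e8, e9, e10, e11, hc, decide_true,
      Bool.true_and, Bool.or_false]
    generalize List.takeWhile (fun c => decide (c ≠ ':')) r = t
    simp only [Bool.or_assoc]
  · rw [if_neg hc]
    simp only [excludedPrefixes, List.any_cons, List.any_nil,
      e1, e2, e3, e4, e5, e6, e7, e8, e9, e10, e11, hc, decide_false,
      Bool.false_and, Bool.or_false, Bool.not_false]

-- ===== VERDICT (by name: the statement is the Claim_ definition above) =====
theorem is_wiki_article_link_py_spec : Claim_equal_is_wiki_article_link_py := by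
  intro href _
  show is_wiki_article_link_py href = is_wiki_article_link_py_alt href
  unfold is_wiki_article_link_py is_wiki_article_link_py_alt
  by_cases hs : PySem.Str.startswith href "/wiki/" = true
  · obtain ⟨r, hr⟩ := (startswith_iff_prefix href).mp hs
    have hguard : PySem.Str.slice href none (some 6) = "/wiki/" :=
      (guard_iff href).mpr ⟨r, hr⟩
    rw [hs, if_neg (not_not_intro hguard), rest_toList href r hr.symm,
        ← cond_eq href r hr.symm]
    cases excludedPrefixes.any (fun p => PySem.Str.startswith href p) <;> simp
  · rw [Bool.not_eq_true] at hs
    have hne : PySem.Str.slice href none (some 6) ≠ "/wiki/" := fun h => by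
      have h2 := (startswith_iff_prefix href).mpr ((guard_iff href).mp h)
      rw [hs] at h2
      exact Bool.false_ne_true h2
    rw [hs, if_pos hne]
    simp
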